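-- pv_equiv track=rewrite | github.com/lane-neuro/research-analytics-suite | research_analytics_suite/hardware_manager/interface/display/HDMI.py | _parse_darwin_output
-- ===== SOURCE A (Python) =====
-- from typing import List, Dict
--
-- def _parse_darwin_output(output: str) -> List[Dict[str, str]]:
--     devices = []
--     lines = output.split('\n')
--     current_device = None
--     for line in lines:
--         if 'HDMI' in line:
--             if current_device:
--                 devices.append(current_device)
--             current_device = {'description': 'HDMI Interface'}
--         if 'HDMI' in line and current_device is not None:
--             current_device['interface'] = line.split()[-1]
--     if current_device:
--         devices.append(current_device)
--     return devices
-- ===== SOURCE B (Python) =====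
-- from typing import List, Dict
--
-- def _parse_darwin_output(output: str) -> List[Dict[str, str]]:
--     # Character-level streaming scanner: no split('\n'), no device state machine.
--     # Lines are delimited by hand; a line is flushed the moment its '\n' (or EOF) is seen.
--     devices = []
--     buf = []
--     for ch in output + '\n':
--         if ch == '\n':
--             line = ''.join(buf)
--             if 'HDMI' in line:
--                 devices.append({'description': 'HDMI Interface',
--                                 'interface': line.split()[-1]})
--             buf = []
--         else:
--             buf.append(ch)
--     return devices
-- ===== Notes on version B (the rewrite author's own statement) =====
-- stated objective: alternative
-- what changed: Replaced A's split-into-lines loop with a mutable current_device/flush state machine by a character-level streaming scanner that delimits lines by hand and emits each HDMI device dict the moment its newline (or EOF) is reached.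
import Mathlib
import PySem

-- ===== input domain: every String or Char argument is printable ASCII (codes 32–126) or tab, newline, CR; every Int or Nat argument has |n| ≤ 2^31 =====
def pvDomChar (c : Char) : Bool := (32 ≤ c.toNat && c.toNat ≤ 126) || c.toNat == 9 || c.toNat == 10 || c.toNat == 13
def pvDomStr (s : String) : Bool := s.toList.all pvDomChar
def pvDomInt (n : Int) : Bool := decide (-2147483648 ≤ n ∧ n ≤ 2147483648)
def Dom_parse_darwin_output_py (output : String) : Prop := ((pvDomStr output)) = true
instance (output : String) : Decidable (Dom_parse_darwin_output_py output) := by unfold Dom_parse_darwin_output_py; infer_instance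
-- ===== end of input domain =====

-- B replaces A's split-into-lines loop with device state by a character-level
-- streaming scanner that delimits lines by hand (alternative decomposition).

-- ===== PORT A =====
-- 'if current_device:' — a dict is truthy iff nonempty, None is falsy
def pvFlush (devices : List (List (String × String))) (cur : Option (PySem.Dict String String)) :
    List (List (String × String)) :=
  match cur with
  | some d => if d.items.isEmpty then devices else devices ++ [d.items]
  | none => devices

-- one iteration of A's for-loop; line.split()[-1] via pyGet?, .getD "" is unreachable
-- (a line containing 'HDMI' has a nonempty split(), so Python never raises here)
def pvStepA (st : List (List (String × String)) × Option (PySem.Dict String String)) (line : String) :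
    List (List (String × String)) × Option (PySem.Dict String String) :=
  let st1 := if PySem.Str.isIn "HDMI" line then
      (pvFlush st.1 st.2, some (PySem.Dict.mk [("description", "HDMI Interface")]))
    else st
  if PySem.Str.isIn "HDMI" line && st1.2.isSome then
    (st1.1, st1.2.map (fun d =>
      PySem.Dict.insert d "interface" ((PySem.List.pyGet? (PySem.Str.split₀ line) (-1)).getD "")))
  else st1

def parse_darwin_output_py (output : String) : List (List (String × String)) :=
  let lines := (PySem.Str.split? output "\n").getD []   -- sep is the literal "\n" ≠ "", so split? is some
  let st := lines.foldl pvStepA ([], none)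
  pvFlush st.1 st.2

-- ===== PORT B =====
-- line = ''.join(buf); the inner flush of B's scanner
def pvEmit (buf : List Char) : Option (List (String × String)) :=
  let line := String.ofList buf
  if PySem.Str.isIn "HDMI" line then
    some [("description", "HDMI Interface"),
          ("interface", (PySem.List.pyGet? (PySem.Str.split₀ line) (-1)).getD "")]
  else none

-- one character of B's scan: flush the buffer at '\n', otherwise extend it
def pvScanB (st : List (List (String × String)) × List Char) (c : Char) :
    List (List (String × String)) × List Char :=
  if c = '\n' then (st.1 ++ (pvEmit st.2).toList, []) else (st.1, st.2 ++ [c])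

def parse_darwin_output_py_alt (output : String) : List (List (String × String)) :=
  ((output.toList ++ ['\n']).foldl pvScanB ([], [])).1

-- ===== PRECONDITION & SPEC =====
def Spec_parse_darwin_output_py (output : String) (out : List (List (String × String))) : Prop := out = parse_darwin_output_py_alt output
instance (output : String) (out : List (List (String × String))) : Decidable (Spec_parse_darwin_output_py output out) := by unfold Spec_parse_darwin_output_py; infer_instance

-- ===== CLAIM (what is proved, stated in full; the proofs are below) =====
def Claim_equal_parse_darwin_output_py : Prop := ∀ (output : String), Dom_parse_darwin_output_py output → Spec_parse_darwin_output_py output (parse_darwin_output_py output)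

-- ===== LEMMAS AND PROOFS =====

-- structural single-char line splitter used as the common reference point of both proofs
def pvSplitNl (buf : List Char) : List Char → List (List Char)
  | [] => [buf]
  | c :: rest => if c = '\n' then buf :: pvSplitNl [] rest else pvSplitNl (buf ++ [c]) rest

theorem pvGo_eq (fuel : Nat) (l cur : List Char) (acc : List (List Char))
    (h : l.length < fuel) :
    PySem.Chars.splitOn.go ['\n'] fuel l cur acc = acc.reverse ++ pvSplitNl cur.reverse l := by
  induction fuel generalizing l cur acc with
  | zero => omega
  | succ fuel ih =>
    cases l with
    | nil => simp [PySem.Chars.splitOn.go, pvSplitNl]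
    | cons c rest =>
      by_cases hc : c = '\n'
      · subst hc
        rw [show PySem.Chars.splitOn.go ['\n'] (fuel + 1) ('\n' :: rest) cur acc
              = PySem.Chars.splitOn.go ['\n'] fuel rest [] (cur.reverse :: acc) by
            simp [PySem.Chars.splitOn.go, List.isPrefixOf]]
        rw [ih rest [] (cur.reverse :: acc) (by simpa using Nat.lt_of_succ_lt_succ h)]
        simp [pvSplitNl]
      · rw [show PySem.Chars.splitOn.go ['\n'] (fuel + 1) (c :: rest) cur acc
              = PySem.Chars.splitOn.go ['\n'] fuel rest (c :: cur) acc by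
            simp [PySem.Chars.splitOn.go, List.isPrefixOf, Ne.symm hc]]
        rw [ih rest (c :: cur) acc (by simpa using Nat.lt_of_succ_lt_succ h)]
        simp [pvSplitNl, hc]

theorem pvSplitOn_eq (l : List Char) :
    PySem.Chars.splitOn l ['\n'] = pvSplitNl [] l := by
  have := pvGo_eq (l.length + 1) l [] [] (by omega)
  simpa [PySem.Chars.splitOn] using this

-- A's loop invariant: flushing the final state equals the flushed initial state
-- followed by one device per line containing 'HDMI'.
theorem pvLoopA (lines : List String)
    (acc : List (List (String × String))) (cur : Option (PySem.Dict String String))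
    (hcur : cur = none ∨ ∃ d, cur = some d ∧ d.items.isEmpty = false) :
    (let st := lines.foldl pvStepA (acc, cur); pvFlush st.1 st.2)
      = pvFlush acc cur ++ lines.filterMap (fun s => pvEmit s.toList) := by
  induction lines generalizing acc cur with
  | nil => simp
  | cons line rest ih =>
    by_cases h : PySem.Chars.isIn ['H', 'D', 'M', 'I'] line.toList = true
    · have hw : pvStepA (acc, cur) line
          = (pvFlush acc cur,
             some (PySem.Dict.mk [("description", "HDMI Interface"),
                   ("interface", (PySem.List.pyGet? (PySem.Str.split₀ line) (-1)).getD "")])) := by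
        simp [pvStepA, h, PySem.Dict.insert]
      have ih' := ih (pvFlush acc cur)
        (some (PySem.Dict.mk [("description", "HDMI Interface"),
               ("interface", (PySem.List.pyGet? (PySem.Str.split₀ line) (-1)).getD "")]))
        (Or.inr ⟨_, rfl, rfl⟩)
      simp only [List.foldl_cons, hw, ih', List.filterMap_cons, pvEmit]
      have h' : PySem.Str.isIn "HDMI" (String.ofList line.toList) = true := by simpa using h
      rw [if_pos h']
      simp [pvFlush]
    · have hw : pvStepA (acc, cur) line = (acc, cur) := by
        simp [pvStepA, h]
      have ih' := ih acc cur hcur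
      simp only [List.foldl_cons, hw, ih', List.filterMap_cons, pvEmit]
      have h' : ¬ PySem.Str.isIn "HDMI" (String.ofList line.toList) = true := by simpa using h
      rw [if_neg h']

-- B's loop invariant: the scan over l ++ ['\n'] emits one device per hand-delimited line
theorem pvLoopB (l : List Char) (acc : List (List (String × String))) (buf : List Char) :
    ((l ++ ['\n']).foldl pvScanB (acc, buf)).1
      = acc ++ (pvSplitNl buf l).filterMap pvEmit := by
  induction l generalizing acc buf with
  | nil =>
    simp only [List.nil_append, List.foldl_cons, List.foldl_nil, pvScanB, pvSplitNl,
      List.filterMap_cons, List.filterMap_nil]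
    cases pvEmit buf <;> simp
  | cons c rest ih =>
    by_cases hc : c = '\n'
    · subst hc
      rw [List.cons_append, List.foldl_cons, show pvScanB (acc, buf) '\n' = (acc ++ (pvEmit buf).toList, []) from if_pos rfl, ih]
      simp only [pvSplitNl]
      cases h : pvEmit buf <;> simp [h]
    · simp only [List.cons_append, List.foldl_cons, pvScanB, if_neg hc]
      rw [ih]
      simp [pvSplitNl, hc]

-- ===== VERDICT (by name: the statement is the Claim_ definition above) =====
theorem parse_darwin_output_py_spec : Claim_equal_parse_darwin_output_py := by
  intro output _
  unfold Spec_parse_darwin_output_py parse_darwin_output_py parse_darwin_output_py_alt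
  have hA := pvLoopA ((PySem.Str.split? output "\n").getD []) [] none (Or.inl rfl)
  simp only at hA
  rw [hA]
  rw [pvLoopB output.toList [] []]
  simp [PySem.Str.split?, PySem.Chars.split?, pvSplitOn_eq, List.filterMap_map,
    Function.comp, pvFlush]
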